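-- pv_equiv track=rewrite | github.com/Chohongjae/chohongjae.github.io | docs/Algorithm/원스토어/test1.py | solution
-- ===== SOURCE A (Python) =====
-- def solution(A):
--     a = {}
--     result = 0
--     for idx, i in enumerate(A):
--         if i not in a:
--             a[i] = idx
--         else:
--             result = max(result, abs(a[i] - idx))
--     return result
-- ===== SOURCE B (Python) =====
-- def solution(A):
--     result = 0
--     for v in set(A):
--         first = A.index(v)
--         last = len(A) - 1 - A[::-1].index(v)
--         result = max(result, last - first)
--     return result
-- ===== Notes on version B (the rewrite author's own statement) =====
-- stated objective: alternative
-- what changed: B drops A's streaming enumerate+dict running-max entirely: it iterates over the distinct values (set(A)) and for each computes its first occurrence with list.index and its last occurrence with a reversed-list index scan, taking max(last-first); no index dictionary and no per-element pass exist in B.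
import Mathlib
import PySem

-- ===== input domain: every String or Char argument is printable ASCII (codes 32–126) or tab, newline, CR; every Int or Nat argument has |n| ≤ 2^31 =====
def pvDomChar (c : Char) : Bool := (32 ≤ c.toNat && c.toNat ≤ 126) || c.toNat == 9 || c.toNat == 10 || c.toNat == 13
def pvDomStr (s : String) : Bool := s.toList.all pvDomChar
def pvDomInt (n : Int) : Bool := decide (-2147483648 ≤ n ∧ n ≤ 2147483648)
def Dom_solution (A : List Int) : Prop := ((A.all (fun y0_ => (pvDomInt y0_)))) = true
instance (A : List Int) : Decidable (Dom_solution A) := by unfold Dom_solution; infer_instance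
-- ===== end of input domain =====

-- B abandons A's streaming enumerate+dict pass: it loops over the distinct values (set(A)) and
-- finds each value's first/last occurrence by forward and reversed index scans (objective: alternative).

-- ===== PORT A =====
-- loop body of A: if i not in a: a[i] = idx  else: result = max(result, abs(a[i] - idx))
def solStepA (ar : PySem.Dict Int Int × Int) (p : Int × Int) : PySem.Dict Int Int × Int :=
  if ar.1.contains p.2 = false then (ar.1.insert p.2 p.1, ar.2)
  else (ar.1, max ar.2 |ar.1.getD p.2 0 - p.1|)

def solution (A : List Int) : Int :=
  ((PySem.List.enumerate A 0).foldl solStepA (PySem.Dict.empty, 0)).2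

-- ===== PORT B =====
-- loop body of B: first = A.index(v); last = len(A)-1 - A[::-1].index(v); result = max(result, last-first).
-- A[::-1] is A.reverse (PySem.List.slice?_none_none_neg_one); v comes from set(A), so both .index
-- calls always succeed and the getD 0 default is never taken (Python would raise ValueError only there).
def solStepB (A : List Int) (r : Int) (v : Int) : Int :=
  let first : Int := ((PySem.List.index? A v).getD 0 : Nat)
  let last : Int := (A.length : Int) - 1 - ((PySem.List.index? A.reverse v).getD 0 : Nat)
  max r (last - first)

def solution_alt (A : List Int) : Int :=
  (PySem.Set.ofList A).foldl (solStepB A) 0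

-- ===== PRECONDITION & SPEC =====
def Spec_solution (A : List Int) (out : Int) : Prop := out = solution_alt A
instance (A : List Int) (out : Int) : Decidable (Spec_solution A out) := by unfold Spec_solution; infer_instance

-- ===== CLAIM (what is proved, stated in full; the proofs are below) =====
def Claim_equal_solution : Prop := ∀ (A : List Int), Dom_solution A → Spec_solution A (solution A)

-- ===== LEMMAS AND PROOFS =====

-- the per-value term of B: (last occurrence index) - (first occurrence index)
def fB (A : List Int) (v : Int) : Int :=
  ((A.length : Int) - 1 - ((PySem.List.index? A.reverse v).getD 0 : Nat))
    - ((PySem.List.index? A v).getD 0 : Nat)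

lemma solStepB_eq (A : List Int) : solStepB A = fun r v => max r (fB A v) := rfl

-- generic facts about folds of shape  max r (f v)
lemma foldl_maxf_le (f : Int → Int) (s : List Int) (c : Int) :
    c ≤ s.foldl (fun r v => max r (f v)) c := by
  induction s generalizing c with
  | nil => simp
  | cons y s ih => exact le_trans (le_max_left _ _) (ih (max c (f y)))

lemma foldl_maxf_acc (f : Int → Int) (s : List Int) (c t : Int) :
    s.foldl (fun r v => max r (f v)) (max c t)
      = max (s.foldl (fun r v => max r (f v)) c) t := by
  induction s generalizing c with
  | nil => rfl
  | cons y s ih =>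
    simp only [List.foldl_cons]
    rw [max_right_comm, ih]

lemma foldl_maxf_congr (f g : Int → Int) (s : List Int) (c : Int)
    (h : ∀ y ∈ s, f y = g y) :
    s.foldl (fun r v => max r (f v)) c = s.foldl (fun r v => max r (g v)) c := by
  induction s generalizing c with
  | nil => rfl
  | cons y s ih =>
    simp only [List.foldl_cons]
    rw [h y List.mem_cons_self, ih (max c (g y)) (fun z hz => h z (List.mem_cons_of_mem _ hz))]

-- replacing one element's term by a larger one pulls it out of the fold
lemma foldl_maxf_update (f g : Int → Int) (x : Int) (hx : g x ≤ f x) :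
    ∀ (s : List Int) (c : Int), (∀ y ∈ s, y ≠ x → f y = g y) → x ∈ s →
    s.foldl (fun r v => max r (f v)) c
      = max (s.foldl (fun r v => max r (g v)) c) (f x) := by
  intro s
  induction s with
  | nil => intro c _ hmem; cases hmem
  | cons y s ih =>
    intro c h hmem
    simp only [List.foldl_cons]
    by_cases hyx : y = x
    · subst hyx
      by_cases hys : y ∈ s
      · rw [ih (max c (f y)) (fun z hz hne => h z (List.mem_cons_of_mem _ hz) hne) hys,
            foldl_maxf_acc g s c (g y), foldl_maxf_acc g s c (f y)]
        omega
      · have hfg : ∀ z ∈ s, f z = g z := by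
          intro z hz
          exact h z (List.mem_cons_of_mem _ hz) (fun he => hys (he ▸ hz))
        rw [foldl_maxf_congr f g s _ hfg, foldl_maxf_acc g s c (g y),
            foldl_maxf_acc g s c (f y)]
        omega
    · have hmem' : x ∈ s := by
        rcases List.mem_cons.1 hmem with h1 | h1
        · exact absurd h1.symm hyx
        · exact h1
      rw [h y List.mem_cons_self hyx,
          ih (max c (g y)) (fun z hz hne => h z (List.mem_cons_of_mem _ hz) hne) hmem']

-- first-occurrence index exists and is in range for members
lemma index?_mem_bound (A : List Int) (v : Int) (hv : v ∈ A) :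
    ∃ i : Nat, PySem.List.index? A v = some i ∧ i < A.length := by
  have hs : (PySem.List.index? A v).isSome := (PySem.List.index?_isSome_iff A v).2 hv
  obtain ⟨i, hi⟩ := Option.isSome_iff_exists.1 hs
  obtain ⟨hlt, _, _⟩ := PySem.List.getElem_of_index?_eq_some hi
  exact ⟨i, hi, hlt⟩

-- behaviour of fB on a snoc, off the new element
lemma fB_snoc_of_mem (A : List Int) (x v : Int) (hv : v ∈ A) (hne : v ≠ x) :
    fB (A ++ [x]) v = fB A v := by
  obtain ⟨j, hj, _⟩ := index?_mem_bound A.reverse v (by simpa using hv)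
  have hrev : (A ++ [x]).reverse = x :: A.reverse := by simp
  unfold fB
  rw [PySem.List.index?_append_of_mem [x] hv, hrev,
      PySem.List.index?_cons_of_ne A.reverse (fun h => hne h.symm), hj]
  simp only [Option.map_some, Option.getD_some, List.length_append, List.length_cons,
    List.length_nil]
  push_cast
  ring

-- the x-term on a snoc: last' = len A, first' unchanged  (for x already in A)
lemma fB_snoc_self_mem (A : List Int) (x : Int) (hx : x ∈ A) :
    fB (A ++ [x]) x = (A.length : Int) - ((PySem.List.index? A x).getD 0 : Nat) := by
  have hrev : (A ++ [x]).reverse = x :: A.reverse := by simp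
  unfold fB
  rw [PySem.List.index?_append_of_mem [x] hx, hrev, PySem.List.index?_cons_self]
  simp only [Option.getD_some, List.length_append, List.length_cons, List.length_nil]
  push_cast
  ring

lemma fB_snoc_self_fresh (A : List Int) (x : Int) (hx : x ∉ A) :
    fB (A ++ [x]) x = 0 := by
  have hrev : (A ++ [x]).reverse = x :: A.reverse := by simp
  unfold fB
  rw [PySem.List.index?_append_singleton_self A x hx, hrev, PySem.List.index?_cons_self]
  simp only [Option.getD_some, List.length_append, List.length_cons, List.length_nil]
  push_cast
  ring

-- fB A x ≤ len A - first x (so the snoc term only grows)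
lemma fB_le (A : List Int) (x : Int) (hx : x ∈ A) :
    fB A x ≤ (A.length : Int) - ((PySem.List.index? A x).getD 0 : Nat) := by
  obtain ⟨j, hj, _⟩ := index?_mem_bound A.reverse x (by simpa using hx)
  unfold fB
  rw [hj]
  simp only [Option.getD_some]
  have : (0:Int) ≤ (j : Int) := Int.natCast_nonneg j
  omega

lemma ofList_snoc_fresh (A : List Int) (x : Int) (hx : x ∉ A) :
    PySem.Set.ofList (A ++ [x]) = PySem.Set.ofList A ++ [x] := by
  rw [PySem.Set.ofList_eq_foldl, List.foldl_append, ← PySem.Set.ofList_eq_foldl]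
  simp only [List.foldl_cons, List.foldl_nil]
  simp [PySem.Set.add, hx]

lemma ofList_snoc_mem (A : List Int) (x : Int) (hx : x ∈ A) :
    PySem.Set.ofList (A ++ [x]) = PySem.Set.ofList A := by
  rw [PySem.Set.ofList_eq_foldl, List.foldl_append, ← PySem.Set.ofList_eq_foldl]
  simp only [List.foldl_cons, List.foldl_nil]
  simp [PySem.Set.add, hx]

-- B on a snoc, new value
lemma alt_snoc_fresh (A : List Int) (x : Int) (hx : x ∉ A) :
    solution_alt (A ++ [x]) = solution_alt A := by
  unfold solution_alt
  rw [ofList_snoc_fresh A x hx, List.foldl_append, solStepB_eq, solStepB_eq,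
      foldl_maxf_congr (fB (A ++ [x])) (fB A) _ 0
        (fun y hy => fB_snoc_of_mem A x y ((PySem.Set.mem_ofList A y).1 hy)
          (fun h => hx (h ▸ (PySem.Set.mem_ofList A y).1 hy)))]
  simp only [List.foldl_cons, List.foldl_nil]
  rw [fB_snoc_self_fresh A x hx]
  exact max_eq_left (foldl_maxf_le (fB A) (PySem.Set.ofList A) 0)

-- B on a snoc, repeated value
lemma alt_snoc_mem (A : List Int) (x : Int) (hx : x ∈ A) :
    solution_alt (A ++ [x])
      = max (solution_alt A) ((A.length : Int) - ((PySem.List.index? A x).getD 0 : Nat)) := by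
  unfold solution_alt
  rw [ofList_snoc_mem A x hx, solStepB_eq, solStepB_eq,
      foldl_maxf_update (fB (A ++ [x])) (fB A) x
        (by rw [fB_snoc_self_mem A x hx]; exact fB_le A x hx)
        (PySem.Set.ofList A) 0
        (fun y hy hne => fB_snoc_of_mem A x y ((PySem.Set.mem_ofList A y).1 hy) hne)
        ((PySem.Set.mem_ofList A x).2 hx),
      fB_snoc_self_mem A x hx]

-- A's fold state after the whole list
def SA (A : List Int) : PySem.Dict Int Int × Int :=
  (PySem.List.enumerate A 0).foldl solStepA (PySem.Dict.empty, 0)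

lemma SA_snoc (A : List Int) (x : Int) :
    SA (A ++ [x]) = solStepA (SA A) ((A.length : Int), x) := by
  unfold SA
  rw [PySem.List.enumerate_append]
  simp [PySem.List.enumerate_cons, PySem.List.enumerate_nil]

-- the main invariant, by snoc induction: the dict holds first-occurrence indices,
-- its keys are the values seen, and the running max equals B's value on the prefix
lemma SA_main (A : List Int) :
    (∀ v : Int, (SA A).1.contains v = decide (v ∈ A))
    ∧ (∀ v ∈ A, (SA A).1.getD v 0 = ((PySem.List.index? A v).getD 0 : Nat))
    ∧ (SA A).2 = solution_alt A := by
  induction A using List.reverseRecOn with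
  | nil =>
    refine ⟨?_, ?_, ?_⟩
    · intro v; simp [SA, PySem.List.enumerate_nil, PySem.Dict.contains_empty]
    · intro v hv; cases hv
    · simp [SA, PySem.List.enumerate_nil, solution_alt, PySem.Set.ofList_eq_foldl]
  | append_singleton A x ih =>
    obtain ⟨ihc, ihg, ihr⟩ := ih
    rw [SA_snoc]
    by_cases hx : x ∈ A
    · have hc : (SA A).1.contains x = true := by rw [ihc]; simp [hx]
      have hstep : solStepA (SA A) ((A.length : Int), x)
          = ((SA A).1, max (SA A).2 |(SA A).1.getD x 0 - (A.length : Int)|) := by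
        simp [solStepA, hc]
      rw [hstep]
      obtain ⟨i, hi, hilt⟩ := index?_mem_bound A x hx
      have hg : (SA A).1.getD x 0 = (i : Int) := by rw [ihg x hx, hi]; simp
      refine ⟨?_, ?_, ?_⟩
      · intro v
        rw [ihc]
        by_cases hv : v = x <;> simp [hv, hx]
      · intro v hv
        have hv' : v ∈ A := by
          rcases List.mem_append.1 hv with h | h
          · exact h
          · exact (by simpa using h : v = x) ▸ hx
        rw [ihg v hv', PySem.List.index?_append_of_mem [x] hv']
      · rw [alt_snoc_mem A x hx, ihr, hg, hi]
        have habs : |(i : Int) - (A.length : Int)| = (A.length : Int) - (i : Int) := by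
          rw [abs_of_nonpos (by omega : (i : Int) - (A.length : Int) ≤ 0)]; ring
        simp [habs]
    · have hc : (SA A).1.contains x = false := by rw [ihc]; simp [hx]
      have hstep : solStepA (SA A) ((A.length : Int), x)
          = ((SA A).1.insert x (A.length : Int), (SA A).2) := by
        simp [solStepA, hc]
      rw [hstep]
      refine ⟨?_, ?_, ?_⟩
      · intro v
        rw [PySem.Dict.contains_insert, ihc]
        by_cases hv : v = x <;> simp [hv]
      · intro v hv
        rcases List.mem_append.1 hv with h | h
        · have hne : v ≠ x := fun he => hx (he ▸ h)
          rw [PySem.Dict.getD_insert, if_neg hne, ihg v h,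
              PySem.List.index?_append_of_mem [x] h]
        · have he : v = x := by simpa using h
          subst he
          rw [PySem.Dict.getD_insert_self, PySem.List.index?_append_singleton_self A v hx]
          simp
      · rw [alt_snoc_fresh A x hx, ihr]

-- ===== VERDICT (by name: the statement is the Claim_ definition above) =====
theorem solution_spec : Claim_equal_solution := by
  intro A _
  unfold Spec_solution
  have h := (SA_main A).2.2
  simpa [SA, solution] using h
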